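-- pv_equiv track=rewrite | github.com/Synapxe-DNA/azure-conversational-assistant | app/backend/test/voice_test.py | split_concatenated_json
-- ===== SOURCE A (Python) =====
-- def split_concatenated_json(text):
--     brace_count = 0
--     first_json_end = 0
--
--     for i, char in enumerate(text):
--         if char == "{":
--             brace_count += 1
--         elif char == "}":
--             brace_count -= 1
--
--         if brace_count == 0:
--             first_json_end = i + 1
--             break
--
--     first_match = text[:first_json_end]
--
--     remaining_text = text[first_json_end:]
--
--     return first_match, remaining_text
-- ===== SOURCE B (Python) =====
-- def split_concatenated_json(text):
--     # two-phase: precompute the running brace-balance table, then find the first zero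
--     deltas = [{"{": 1, "}": -1}.get(c, 0) for c in text]
--     sums = []
--     bal = 0
--     for d in deltas:
--         bal += d
--         sums.append(bal)
--     cut = next((i + 1 for i, b in enumerate(sums) if b == 0), 0)
--     return text[:cut], text[cut:]
-- ===== Notes on version B (the rewrite author's own statement) =====
-- stated objective: alternative
-- what changed: Replaces A's fused update-and-break loop by a two-phase decomposition: map characters to brace deltas, materialise the running balance table, then locate the first zero in a separate scan (defaulting to 0).
import Mathlib
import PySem

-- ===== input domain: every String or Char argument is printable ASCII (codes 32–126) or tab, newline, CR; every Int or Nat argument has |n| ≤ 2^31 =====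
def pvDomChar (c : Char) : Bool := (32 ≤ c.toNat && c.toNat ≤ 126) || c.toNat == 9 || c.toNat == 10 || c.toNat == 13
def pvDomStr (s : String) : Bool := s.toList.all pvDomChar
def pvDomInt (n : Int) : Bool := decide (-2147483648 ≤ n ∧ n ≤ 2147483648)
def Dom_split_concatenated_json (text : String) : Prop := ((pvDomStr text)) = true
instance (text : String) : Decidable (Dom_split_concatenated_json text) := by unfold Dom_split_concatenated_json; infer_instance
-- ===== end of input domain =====

-- B replaces A's fused update-and-break loop with a two-phase decomposition (delta map, running-balance table, separate first-zero scan); objective: alternative, same O(n) cost.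


-- ===== PORT A =====
-- A's loop: update brace_count per char, break at the first index with count 0, default 0.
def pvALoop : List Char → Int → Nat → Nat
  | [], _, _ => 0
  | c :: rest, bal, i =>
    let bal' := if c = '{' then bal + 1 else if c = '}' then bal - 1 else bal
    if bal' = 0 then i + 1 else pvALoop rest bal' (i + 1)

-- text[:k] / text[k:] with k a Nat are ported as PySem.List.slice with nonnegative bounds.
def split_concatenated_json (text : String) : String × String :=
  let first_json_end := pvALoop text.toList 0 0
  let first_match := String.ofList (PySem.List.slice text.toList none (some (first_json_end : Int)))
  let remaining_text := String.ofList (PySem.List.slice text.toList (some (first_json_end : Int)) none)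
  (first_match, remaining_text)

-- ===== PORT B =====
-- B phase 1: per-character brace deltas.
def pvDeltas (l : List Char) : List Int :=
  l.map (fun c => if c = '{' then (1 : Int) else if c = '}' then -1 else 0)

-- B phase 2: running cumulative sums of the deltas.
def pvSums : List Int → Int → List Int
  | [], _ => []
  | d :: rest, bal => (bal + d) :: pvSums rest (bal + d)

-- B phase 3: first index i with sums[i] = 0, as i+1; default 0 (Python's next(..., 0)).
def pvFirstZero : List Int → Nat → Nat
  | [], _ => 0
  | b :: rest, i => if b = 0 then i + 1 else pvFirstZero rest (i + 1)

def split_concatenated_json_alt (text : String) : String × String :=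
  let cut := pvFirstZero (pvSums (pvDeltas text.toList) 0) 0
  (String.ofList (PySem.List.slice text.toList none (some (cut : Int))),
   String.ofList (PySem.List.slice text.toList (some (cut : Int)) none))

-- ===== PRECONDITION & SPEC =====
def Spec_split_concatenated_json (text : String) (out : String × String) : Prop := out = split_concatenated_json_alt text
instance (text : String) (out : String × String) : Decidable (Spec_split_concatenated_json text out) := by unfold Spec_split_concatenated_json; infer_instance

-- ===== CLAIM (what is proved, stated in full; the proofs are below) =====
def Claim_equal_split_concatenated_json : Prop := ∀ (text : String), Dom_split_concatenated_json text → Spec_split_concatenated_json text (split_concatenated_json text)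

-- ===== LEMMAS AND PROOFS =====
theorem pvALoop_eq_phases (l : List Char) (bal : Int) (i : Nat) :
    pvALoop l bal i = pvFirstZero (pvSums (pvDeltas l) bal) i := by
  induction l generalizing bal i with
  | nil => rfl
  | cons c rest ih =>
    simp only [pvALoop, pvDeltas, List.map, pvSums, pvFirstZero]
    by_cases h1 : c = '{'
    · simp [h1, ih, pvDeltas]
    · by_cases h2 : c = '}'
      · simp [h2, ih, pvDeltas, sub_eq_add_neg]
      · simp [h1, h2, ih, pvDeltas]

-- ===== VERDICT (by name: the statement is the Claim_ definition above) =====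
theorem split_concatenated_json_spec : Claim_equal_split_concatenated_json := by
  intro text _
  unfold Spec_split_concatenated_json split_concatenated_json split_concatenated_json_alt
  rw [pvALoop_eq_phases]
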